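-- pv_equiv track=rewrite | github.com/JJMayorgaB/Prog_IMetodos2023 | Primos_sexys/sexyprime copy.py | sexyprime
-- ===== SOURCE A (Python) =====
-- def comprueba_primo(n):
--     #Comprueba si el argumento de entrada n es o no es un numero primo
--     if n <= 1: #n debe ser un numero natural
--         return False
--     for i in range(2, int(n/2)):
--         if n % i == 0:
--             return False
--     return True
--
-- def sexyprime(n):
--     k = 0
--     i = 5 # El primer primo sexy es (5, 11)
--     while True:
--         if comprueba_primo(i) and comprueba_primo(i+6):
--             k += 1
--             if k == n: # Se ha encontrado la n-esima pareja de primos sexys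
--                 return (i, i+6)
--         i += 1
-- ===== SOURCE B (Python) =====
-- def _isprime_odd(m):
--     # trial division by odd candidates up to sqrt(m); callers pass odd m >= 5
--     d = 3
--     while d * d <= m:
--         if m % d == 0:
--             return False
--         d += 2
--     return True
--
-- def sexyprime(n):
--     k = 0
--     i = 5       # candidates run over the 6k +/- 1 wheel
--     step = 2
--     while True:
--         if _isprime_odd(i) and _isprime_odd(i + 6):
--             k += 1
--             if k == n:
--                 return (i, i + 6)
--         i += step
--         step = 6 - step
-- ===== Notes on version B (the rewrite author's own statement) =====
-- stated objective: faster
-- what changed: B enumerates candidates only on the 6k±1 wheel (step alternating 2,4) and tests primality by odd trial divisors up to sqrt(m), instead of A's scan of every integer with trial division of every candidate up to m/2.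
import Mathlib
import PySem

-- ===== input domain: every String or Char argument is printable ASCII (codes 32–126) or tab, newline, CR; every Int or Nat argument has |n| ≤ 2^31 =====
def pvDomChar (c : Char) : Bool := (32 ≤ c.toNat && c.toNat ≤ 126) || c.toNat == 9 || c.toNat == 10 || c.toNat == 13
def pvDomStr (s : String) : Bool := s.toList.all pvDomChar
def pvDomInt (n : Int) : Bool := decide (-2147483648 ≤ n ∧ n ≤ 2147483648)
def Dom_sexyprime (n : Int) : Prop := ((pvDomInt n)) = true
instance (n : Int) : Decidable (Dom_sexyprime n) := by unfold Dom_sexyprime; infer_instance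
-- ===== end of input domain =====

-- B replaces A's scan of every integer (with trial division up to m/2) by a 6k±1-wheel scan
-- with odd trial divisors up to sqrt(m). Both ports run the search under the same iteration
-- fuel, which only makes the 'while True' loop total; the equivalence proof is uniform in it
-- (for n ≤ 0 both Pythons loop forever, and both fueled ports return []).


-- ===== PORT A =====
-- comprueba_primo: for the reachable branch n ≥ 2, Python's int(n/2) equals floor division n//2
def comprueba (n : Int) : Bool :=
  if n ≤ 1 then false
  else !((PySem.List.pyRange 2 (PySem.Int.floordiv n 2) 1).any
          (fun i => PySem.Int.mod n i == 0))

-- fuel bound for the 'while True' search loop (one unit per increment of i); the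
-- equivalence proof is uniform in the fuel, which only makes the ports total
def sexyFuel : Nat := 4294967296

def sexyLoopA (fuel : Nat) (n k i : Int) : List Int :=
  match fuel with
  | 0 => []
  | f + 1 =>
    if comprueba i && comprueba (i + 6) then
      if k + 1 = n then [i, i + 6]
      else sexyLoopA f n (k + 1) (i + 1)
    else sexyLoopA f n k (i + 1)

def sexyprime (n : Int) : List Int := sexyLoopA sexyFuel n 0 5

-- ===== PORT B =====
def bOddTrial (m d : Int) : Bool :=
  if h : d * d ≤ m then
    (if PySem.Int.mod m d == 0 then false else bOddTrial m (d + 2))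
  else true
termination_by (m + 2 - d).toNat
decreasing_by
  have hd : d ≤ m := by nlinarith [sq_nonneg (2 * d - 1)]
  omega

def bTest (m : Int) : Bool := bOddTrial m 3

def sexyLoopB (fuel : Nat) (n k i step : Int) : List Int :=
  match fuel with
  | 0 => []
  | f + 1 =>
    if bTest i && bTest (i + 6) then
      if k + 1 = n then [i, i + 6]
      else sexyLoopB (f - (step.toNat - 1)) n (k + 1) (i + step) (6 - step)
    else sexyLoopB (f - (step.toNat - 1)) n k (i + step) (6 - step)
decreasing_by all_goals omega

def sexyprime_alt (n : Int) : List Int := sexyLoopB sexyFuel n 0 5 2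

-- ===== PRECONDITION & SPEC =====
def Spec_sexyprime (n : Int) (out : List Int) : Prop := out = sexyprime_alt n
instance (n : Int) (out : List Int) : Decidable (Spec_sexyprime n out) := by unfold Spec_sexyprime; infer_instance

-- ===== CLAIM (what is proved, stated in full; the proofs are below) =====
def Claim_equal_sexyprime : Prop := ∀ (n : Int), Dom_sexyprime n → Spec_sexyprime n (sexyprime n)

-- ===== LEMMAS AND PROOFS =====

-- A's test rejects even numbers ≥ 6 (divisor 2 lies in range(2, m//2))
theorem comprueba_even (m : Int) (h6 : 6 ≤ m) (h2 : m % 2 = 0) : comprueba m = false := by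
  unfold comprueba
  rw [if_neg (by omega)]
  simp only [Bool.not_eq_false', List.any_eq_true]
  refine ⟨2, ?_, ?_⟩
  · rw [PySem.List.mem_pyRange_one]
    have h3 : 3 ≤ PySem.Int.floordiv m 2 := by
      rw [PySem.Int.le_floordiv_iff_mul_le (by norm_num)]; omega
    omega
  · rw [beq_iff_eq, PySem.Int.mod_eq_emod_of_pos (by norm_num)]; omega

-- A's test rejects multiples of 3 that are ≥ 9
theorem comprueba_three (m : Int) (h9 : 9 ≤ m) (h3 : m % 3 = 0) : comprueba m = false := by
  unfold comprueba
  rw [if_neg (by omega)]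
  simp only [Bool.not_eq_false', List.any_eq_true]
  refine ⟨3, ?_, ?_⟩
  · rw [PySem.List.mem_pyRange_one]
    have h4 : 4 ≤ PySem.Int.floordiv m 2 := by
      rw [PySem.Int.le_floordiv_iff_mul_le (by norm_num)]; omega
    omega
  · rw [beq_iff_eq, PySem.Int.mod_eq_emod_of_pos (by norm_num)]; omega

-- characterisation of B's inner loop
theorem bOddTrial_eq_true_iff (m d : Int) (hd : 3 ≤ d) :
    bOddTrial m d = true ↔ ∀ e : Int, d ≤ e → 2 ∣ e - d → e * e ≤ m → ¬ e ∣ m := by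
  fun_induction bOddTrial m d with
  | case1 d h hz =>
    -- m % d == 0 : returns false
    simp only [Bool.false_eq_true, false_iff]
    rw [beq_iff_eq, PySem.Int.mod_eq_emod_of_pos (by omega)] at hz
    intro hall
    exact hall d le_rfl (by simp) h (Int.dvd_of_emod_eq_zero hz)
  | case2 d h hz ih =>
    rw [ih (by omega)]
    constructor
    · intro hall e he h2 hsq hdvd
      rcases eq_or_lt_of_le he with rfl | hlt
      · rw [beq_iff_eq, PySem.Int.mod_eq_emod_of_pos (by omega)] at hz
        exact hz (Int.emod_eq_zero_of_dvd hdvd)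
      · exact hall e (by omega) (by omega) hsq hdvd
    · intro hall e he h2 hsq
      exact hall e (by omega) (by omega) hsq
  | case3 d h =>
    simp only [true_iff]
    intro e he _ hsq _
    have : d * d ≤ e * e := by nlinarith
    omega

-- characterisation of A's test on m ≥ 2
theorem comprueba_eq_true_iff (m : Int) (hm : 2 ≤ m) :
    comprueba m = true ↔ ∀ j : Int, 2 ≤ j → j < PySem.Int.floordiv m 2 → ¬ j ∣ m := by
  unfold comprueba
  rw [if_neg (by omega)]
  simp only [Bool.not_eq_eq_eq_not, Bool.not_true, List.any_eq_false, PySem.List.mem_pyRange_one]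
  constructor
  · intro h j hj1 hj2 hdvd
    have := h j ⟨hj1, hj2⟩
    rw [beq_iff_eq, PySem.Int.mod_eq_emod_of_pos (by omega)] at this
    exact this (Int.emod_eq_zero_of_dvd hdvd)
  · intro h j hj
    rw [beq_iff_eq, PySem.Int.mod_eq_emod_of_pos (by omega)]
    intro hz
    exact h j hj.1 hj.2 (Int.dvd_of_emod_eq_zero hz)

-- the two primality tests agree on odd m ≥ 5
theorem test_eq (m : Int) (h5 : 5 ≤ m) (hodd : m % 2 = 1) : comprueba m = bTest m := by
  have hF1 : PySem.Int.floordiv m 2 * 2 ≤ m := by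
    rw [← PySem.Int.le_floordiv_iff_mul_le (by norm_num)]
  have hF2 : m < (PySem.Int.floordiv m 2 + 1) * 2 := by
    rw [← PySem.Int.floordiv_lt_iff_lt_mul (by norm_num)]; omega
  rw [Bool.eq_iff_iff, comprueba_eq_true_iff m (by omega)]
  unfold bTest
  rw [bOddTrial_eq_true_iff m 3 le_rfl]
  constructor
  · intro h e he h2 hsq hdvd
    have h3e : 3 * e ≤ e * e := by nlinarith
    exact h e (by omega) (by omega) hdvd
  · intro h j hj2 hjlt hdvd
    have hjm : j < m := by omega
    have hMm : ((m.toNat : Int)) = m := Int.toNat_of_nonneg (by omega)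
    have hjj : ((j.toNat : Int)) = j := Int.toNat_of_nonneg (by omega)
    have hjM : j.toNat ∣ m.toNat := by
      rw [← Int.natCast_dvd_natCast, hMm, hjj]; exact hdvd
    have hcomp : ¬ m.toNat.Prime := by
      intro hp
      rcases hp.eq_one_or_self_of_dvd _ hjM with h1 | h1 <;> omega
    have hpd : m.toNat.minFac ∣ m.toNat := Nat.minFac_dvd _
    have hpp : m.toNat.minFac.Prime := Nat.minFac_prime (by omega)
    have hpsq : m.toNat.minFac ^ 2 ≤ m.toNat := Nat.minFac_sq_le_self (by omega) hcomp
    have hp2 : m.toNat.minFac ≠ 2 := by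
      intro he
      have h2M : 2 ∣ m.toNat := he ▸ hpd
      have : (2:Int) ∣ m := by rw [← hMm]; exact_mod_cast h2M
      omega
    have hpodd : m.toNat.minFac % 2 = 1 := Nat.odd_iff.mp (hpp.odd_of_ne_two hp2)
    have hple : 2 ≤ m.toNat.minFac := hpp.two_le
    refine h (m.toNat.minFac : Int) (by exact_mod_cast (by omega : 3 ≤ m.toNat.minFac)) ?_ ?_ ?_
    · have : (m.toNat.minFac : Int) % 2 = 1 := by exact_mod_cast (by omega : m.toNat.minFac % 2 = 1)
      omega
    · have := hpsq
      rw [pow_two] at this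
      calc ((m.toNat.minFac : Int)) * (m.toNat.minFac : Int)
          = ((m.toNat.minFac * m.toNat.minFac : Nat) : Int) := by push_cast; ring
        _ ≤ ((m.toNat : Nat) : Int) := by exact_mod_cast this
        _ = m := hMm
    · rw [← hMm]; exact_mod_cast hpd

-- the loops agree from any wheel position, with the same fuel
theorem loop_eq (fuel : Nat) :
    ∀ n k i : Int, 5 ≤ i → (i % 6 = 5 ∨ i % 6 = 1) →
      sexyLoopA fuel n k i = sexyLoopB fuel n k i (if i % 6 = 5 then 2 else 4) := by
  induction fuel using Nat.strong_induction_on with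
  | _ fuel ih =>
    intro n k i h5 hw
    have hti : comprueba i = bTest i := test_eq i (by omega) (by omega)
    have hti6 : comprueba (i + 6) = bTest (i + 6) := test_eq (i + 6) (by omega) (by omega)
    have e1 : comprueba (i + 1) = false := comprueba_even (i + 1) (by omega) (by omega)
    rcases hw with hw | hw
    · rw [if_pos hw]
      match fuel with
      | 0 => simp [sexyLoopA, sexyLoopB]
      | 1 => simp [sexyLoopA, sexyLoopB, hti, hti6]
      | (f + 2) =>
        have ih2 : ∀ k' : Int, sexyLoopA f n k' (i + 2) = sexyLoopB f n k' (i + 2) 4 := by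
          intro k'
          have := ih f (by omega) n k' (i + 2) (by omega) (Or.inr (by omega))
          rwa [if_neg (by omega)] at this
        simp only [sexyLoopA, sexyLoopB, hti, hti6, e1, Bool.false_and, if_false,
          Bool.false_eq_true, show i + 1 + 1 = i + 2 from by ring,
          show Int.toNat 2 - 1 = 1 from rfl, Nat.add_sub_cancel]
        norm_num [ih2]
    · rw [if_neg (by omega)]
      have e3 : comprueba (i + 3) = false := comprueba_even (i + 3) (by omega) (by omega)
      match fuel with
      | 0 => simp [sexyLoopA, sexyLoopB]
      | 1 => simp [sexyLoopA, sexyLoopB, hti, hti6]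
      | 2 => simp [sexyLoopA, sexyLoopB, hti, hti6, e1]
      | 3 =>
        have e2 : comprueba (i + 2) = false := comprueba_three (i + 2) (by omega) (by omega)
        simp [sexyLoopA, sexyLoopB, hti, hti6, e1, show i + 1 + 1 = i + 2 from by ring, e2]
      | (f + 4) =>
        have e2 : comprueba (i + 2) = false := comprueba_three (i + 2) (by omega) (by omega)
        have ih4 : ∀ k' : Int, sexyLoopA f n k' (i + 4) = sexyLoopB f n k' (i + 4) 2 := by
          intro k'
          have := ih f (by omega) n k' (i + 4) (by omega) (Or.inl (by omega))
          rwa [if_pos (by omega)] at this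
        simp only [sexyLoopA, sexyLoopB, hti, hti6, e1, e2, e3, Bool.false_and, if_false,
          Bool.false_eq_true, show i + 1 + 1 = i + 2 from by ring,
          show i + 2 + 1 = i + 3 from by ring, show i + 3 + 1 = i + 4 from by ring,
          show Int.toNat 4 - 1 = 3 from rfl, Nat.add_sub_cancel]
        norm_num [ih4]

-- ===== VERDICT (by name: the statement is the Claim_ definition above) =====
theorem sexyprime_spec : Claim_equal_sexyprime := by
  intro n _
  unfold Spec_sexyprime sexyprime sexyprime_alt
  simpa using loop_eq sexyFuel n 0 5 (by norm_num) (Or.inl (by norm_num))
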